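-- pv_equiv track=rewrite | github.com/santiago-gamboa2/juegomlp | main_proyecto5.py | encontrar_inicio_y_fin
-- ===== SOURCE A (Python) =====
-- def encontrar_inicio_y_fin(mapa_str):
--     filas = mapa_str.strip().split('\n')
--     inicio = None
--     fin = None
--
--     for y, fila in enumerate(filas):
--         for x, caracter in enumerate(fila):
--             if caracter == 'P':
--                 inicio = (x, y)
--             elif caracter == '.':
--                 fin = (x, y)
--
--     if inicio is None or fin is None:
--         raise ValueError("El mapa no contiene coordenadas de inicio o fin válidas.")
--
--     return inicio, fin
-- ===== SOURCE B (Python) =====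
-- def encontrar_inicio_y_fin(mapa_str):
--     filas = mapa_str.strip().split('\n')
--     inicio = None
--     fin = None
--
--     for y, fila in reversed(list(enumerate(filas))):
--         if inicio is None:
--             x = fila.rfind('P')
--             if x != -1:
--                 inicio = (x, y)
--         if fin is None:
--             x = fila.rfind('.')
--             if x != -1:
--                 fin = (x, y)
--         if inicio is not None and fin is not None:
--             break
--
--     if inicio is None or fin is None:
--         raise ValueError("El mapa no contiene coordenadas de inicio o fin válidas.")
--
--     return inicio, fin
-- ===== Notes on version B (the rewrite author's own statement) =====
-- stated objective: alternative
-- what changed: Instead of scanning every cell forward and overwriting, B walks the rows from the bottom up, uses str.rfind per row for each target independently, and stops as soon as both coordinates are found.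
import Mathlib
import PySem

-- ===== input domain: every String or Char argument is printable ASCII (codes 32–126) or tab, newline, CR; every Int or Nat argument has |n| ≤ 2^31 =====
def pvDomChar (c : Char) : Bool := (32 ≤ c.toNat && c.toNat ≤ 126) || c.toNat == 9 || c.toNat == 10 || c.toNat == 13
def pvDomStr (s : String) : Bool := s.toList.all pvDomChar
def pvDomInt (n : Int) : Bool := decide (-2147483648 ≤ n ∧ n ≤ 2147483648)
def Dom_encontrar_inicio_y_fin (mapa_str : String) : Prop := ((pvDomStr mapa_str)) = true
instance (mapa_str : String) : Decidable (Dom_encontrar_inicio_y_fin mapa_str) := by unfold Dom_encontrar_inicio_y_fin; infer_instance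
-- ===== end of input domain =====

-- B searches the rows from the bottom up with str.rfind per target and stops early; same result, different traversal (objective: alternative).

-- ===== PORT A =====
def encontrar_inicio_y_fin (mapa_str : String) : (Int × Int) × (Int × Int) :=
  let filas := (PySem.Str.split? (PySem.Str.strip mapa_str) "\n").getD []   -- sep ≠ "", so split? is some
  let st := (PySem.List.enumerate filas).foldl
    (fun (st : Option (Int × Int) × Option (Int × Int)) yf =>
      (PySem.List.enumerate yf.2.toList).foldl
        (fun st xc =>
          if xc.2 = 'P' then (some (xc.1, yf.1), st.2)
          else if xc.2 = '.' then (st.1, some (xc.1, yf.1))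
          else st) st) (none, none)
  match st with
  | (some i, some f) => (i, f)
  | _ => ((0, 0), (0, 0))   -- Python raises ValueError here; excluded by Pre_

-- ===== PORT B =====
-- the loop body of Source B: rows in reverse enumeration order, early break once both are found
def pvBLoop : List (Int × String) → Option (Int × Int) → Option (Int × Int) → Option (Int × Int) × Option (Int × Int)
  | [], inicio, fin => (inicio, fin)
  | yf :: rest, inicio, fin =>
    let inicio := match inicio with
      | some v => some v
      | none => let x := PySem.Str.rfind yf.2 "P"; if x ≠ -1 then some (x, yf.1) else none
    let fin := match fin with
      | some v => some v
      | none => let x := PySem.Str.rfind yf.2 "."; if x ≠ -1 then some (x, yf.1) else none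
    if inicio.isSome && fin.isSome then (inicio, fin)
    else pvBLoop rest inicio fin

def encontrar_inicio_y_fin_alt (mapa_str : String) : (Int × Int) × (Int × Int) :=
  let filas := (PySem.Str.split? (PySem.Str.strip mapa_str) "\n").getD []
  let r := pvBLoop (PySem.List.enumerate filas).reverse none none
  match r.1, r.2 with
  | some i, some f => (i, f)
  | some _, none => ((0, 0), (0, 0))   -- Python raises ValueError here; excluded by Pre_
  | none, _ => ((0, 0), (0, 0))

-- ===== PRECONDITION & SPEC =====
-- Pre_ excludes exactly the maps with no 'P' or no '.', on which Python A raises ValueError.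
def Pre_encontrar_inicio_y_fin (mapa_str : String) : Prop :=
  'P' ∈ mapa_str.toList ∧ '.' ∈ mapa_str.toList
instance (mapa_str : String) : Decidable (Pre_encontrar_inicio_y_fin mapa_str) := by
  unfold Pre_encontrar_inicio_y_fin; infer_instance

def pvWitness_encontrar_inicio_y_fin : String := "P#\n#."

def Spec_encontrar_inicio_y_fin (mapa_str : String) (out : (Int × Int) × (Int × Int)) : Prop := out = encontrar_inicio_y_fin_alt mapa_str
instance (mapa_str : String) (out : (Int × Int) × (Int × Int)) : Decidable (Spec_encontrar_inicio_y_fin mapa_str out) := by unfold Spec_encontrar_inicio_y_fin; infer_instance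

-- ===== CLAIM (what is proved, stated in full; the proofs are below) =====
def Claim_equal_encontrar_inicio_y_fin : Prop := ∀ (mapa_str : String), Dom_encontrar_inicio_y_fin mapa_str → Pre_encontrar_inicio_y_fin mapa_str → Spec_encontrar_inicio_y_fin mapa_str (encontrar_inicio_y_fin mapa_str)

-- ===== LEMMAS AND PROOFS =====

-- rightmost index of c in s (proof-side notion; mirrors str.rfind of a single char)
def pvRl (c : Char) : List Char → Option Nat
  | [] => none
  | x :: xs =>
    match pvRl c xs with
    | some k => some (k + 1)
    | none => if x = c then some 0 else none

-- the value a row (y, fila) contributes for target c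
def pvH (c : Char) (p : Int × String) : Option (Int × Int) :=
  match pvRl c p.2.toList with
  | some k => some (((k : Nat) : Int), p.1)
  | none => none

theorem pvRl_none_forall (c : Char) : ∀ (s : List Char), pvRl c s = none → ∀ (k : Nat), s[k]? ≠ some c := by
  intro s
  induction s with
  | nil => intro _ k; simp
  | cons x xs ih =>
    intro h k
    simp only [pvRl] at h
    cases hx : pvRl c xs with
    | some m => rw [hx] at h; cases h
    | none =>
      rw [hx] at h
      by_cases hxc : x = c
      · simp [hxc] at h
      · cases k with
        | zero =>
          simp only [List.getElem?_cons_zero]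
          intro hc
          exact hxc (by injection hc)
        | succ k => simpa using ih hx k

theorem pvRl_spec_some (c : Char) : ∀ (s : List Char) (m : Nat), pvRl c s = some m →
    m < s.length ∧ s[m]? = some c ∧ ∀ (k : Nat), m < k → s[k]? ≠ some c := by
  intro s
  induction s with
  | nil => intro m h; simp [pvRl] at h
  | cons x xs ih =>
    intro m h
    simp only [pvRl] at h
    cases hx : pvRl c xs with
    | some k =>
      rw [hx] at h
      obtain ⟨hlt, hget, hmax⟩ := ih k hx
      cases h
      refine ⟨by simpa using hlt, by simpa using hget, ?_⟩
      intro j hj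
      cases j with
      | zero => omega
      | succ j => simpa using hmax j (by omega)
    | none =>
      rw [hx] at h
      by_cases hxc : x = c
      · simp [hxc] at h
        subst h
        refine ⟨by simp, by simp [hxc], ?_⟩
        intro j hj
        cases j with
        | zero => omega
        | succ j => simpa using pvRl_none_forall c xs hx j
      · simp [hxc] at h

theorem pvPrefix_at (c : Char) (s : List Char) (j : Nat) :
    ([c].isPrefixOf (List.drop j s) = true) ↔ s[j]? = some c := by
  rw [show s[j]? = (List.drop j s).head? from (List.head?_drop).symm,
    List.isPrefixOf_iff_prefix]
  cases List.drop j s with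
  | nil => simp
  | cons y ys =>
    simp only [List.head?_cons, Option.some_inj]
    constructor
    · intro hp
      obtain ⟨t, ht⟩ := hp
      injection ht with h1 _
      exact h1.symm
    · intro hy
      subst hy
      exact ⟨ys, rfl⟩

theorem pvGo_none (s : List Char) (c : Char) (h : ∀ (k : Nat), s[k]? ≠ some c) :
    ∀ j, PySem.Chars.rfind.go s [c] j = -1 := by
  intro j
  induction j with
  | zero =>
    simp only [PySem.Chars.rfind.go]
    rw [if_neg]
    intro hp
    exact h 0 ((pvPrefix_at c s 0).mp (by simpa using hp))
  | succ j ih =>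
    simp only [PySem.Chars.rfind.go]
    rw [if_neg, ih]
    intro hp
    exact h (j + 1) ((pvPrefix_at c s (j + 1)).mp hp)

theorem pvGo_some (s : List Char) (c : Char) (m : Nat) (hget : s[m]? = some c)
    (hmax : ∀ (k : Nat), m < k → s[k]? ≠ some c) :
    ∀ j, m ≤ j → PySem.Chars.rfind.go s [c] j = (m : Int) := by
  intro j
  induction j with
  | zero =>
    intro hj
    have hm0 : m = 0 := by omega
    subst hm0
    have hp : [c].isPrefixOf (List.drop 0 s) = true := (pvPrefix_at c s 0).mpr hget
    simp only [PySem.Chars.rfind.go]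
    rw [if_pos (by simpa using hp)]
    simp
  | succ j ih =>
    intro hj
    simp only [PySem.Chars.rfind.go]
    by_cases hm : m = j + 1
    · subst hm
      rw [if_pos ((pvPrefix_at c s (j + 1)).mpr hget)]
    · rw [if_neg, ih (by omega)]
      intro hp
      exact hmax (j + 1) (by omega) ((pvPrefix_at c s (j + 1)).mp hp)

theorem pvRfind_single (s : List Char) (c : Char) :
    PySem.Chars.rfind s [c] = match pvRl c s with | some m => (m : Int) | none => -1 := by
  cases h : pvRl c s with
  | some m =>
    obtain ⟨hlt, hget, hmax⟩ := pvRl_spec_some c s m h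
    simpa [PySem.Chars.rfind] using pvGo_some s c m hget hmax s.length (by omega)
  | none =>
    simpa [PySem.Chars.rfind] using pvGo_none s c (pvRl_none_forall c s h) s.length

-- B's per-row contribution equals pvH
theorem pvRowB_eq (c : Char) (cs : String) (hcs : cs.toList = [c]) (p : Int × String) :
    (let x := PySem.Str.rfind p.2 cs; if x ≠ -1 then some (x, p.1) else none) = pvH c p := by
  have : PySem.Str.rfind p.2 cs = PySem.Chars.rfind p.2.toList [c] := by
    rw [PySem.Str.rfind_eq, hcs]
  rw [this, pvRfind_single]
  unfold pvH
  cases pvRl c p.2.toList with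
  | none => simp
  | some m =>
    simp only
    rw [if_pos (show ¬((m : Nat) : Int) = -1 by omega)]

-- A's inner char loop for a single target
theorem pvInner_eq (c : Char) (y : Int) : ∀ (s : List Char) (i : Int) (o : Option (Int × Int)),
    (PySem.List.enumerate s i).foldl (fun o xc => if xc.2 = c then some (xc.1, y) else o) o
      = Option.or (match pvRl c s with
          | some k => some ((i + ((k : Nat) : Int), y))
          | none => none) o := by
  intro s
  induction s with
  | nil => intro i o; simp [PySem.List.enumerate_nil, pvRl]
  | cons x xs ih =>
    intro i o
    rw [PySem.List.enumerate_cons]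
    simp only [List.foldl_cons]
    rw [ih]
    simp only [pvRl]
    cases hx : pvRl c xs with
    | some k =>
      simp only
      have : i + 1 + ((k : Nat) : Int) = i + (((k + 1 : Nat) : Nat) : Int) := by push_cast; ring
      rw [this]
      simp [Option.or]
    | none =>
      by_cases hxc : x = c <;> simp [hxc]

-- A's combined fold splits into two independent single-target folds
theorem pvPairFold (y : Int) : ∀ (l : List (Int × Char)) (a b : Option (Int × Int)),
    l.foldl (fun (st : Option (Int × Int) × Option (Int × Int)) xc =>
        if xc.2 = 'P' then (some (xc.1, y), st.2)
        else if xc.2 = '.' then (st.1, some (xc.1, y))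
        else st) (a, b)
      = (l.foldl (fun o xc => if xc.2 = 'P' then some (xc.1, y) else o) a,
         l.foldl (fun o xc => if xc.2 = '.' then some (xc.1, y) else o) b) := by
  intro l
  induction l with
  | nil => intro a b; simp
  | cons x xs ih =>
    intro a b
    simp only [List.foldl_cons]
    by_cases h1 : x.2 = 'P'
    · have h2 : ¬ x.2 = '.' := by rw [h1]; decide
      simp [h1, ih]
    · by_cases h2 : x.2 = '.'
      · simp [h2, ih]
      · simp [h1, h2, ih]


-- A's whole scan, characterised
theorem pvAScan (rows : List (Int × String)) (a b : Option (Int × Int)) :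
    rows.foldl
      (fun (st : Option (Int × Int) × Option (Int × Int)) yf =>
        (PySem.List.enumerate yf.2.toList).foldl
          (fun st xc =>
            if xc.2 = 'P' then (some (xc.1, yf.1), st.2)
            else if xc.2 = '.' then (st.1, some (xc.1, yf.1))
            else st) st) (a, b)
      = (Option.or (rows.reverse.findSome? (pvH 'P')) a,
         Option.or (rows.reverse.findSome? (pvH '.')) b) := by
  have step : ∀ (st : Option (Int × Int) × Option (Int × Int)) (yf : Int × String),
      (PySem.List.enumerate yf.2.toList).foldl
          (fun st xc =>
            if xc.2 = 'P' then (some (xc.1, yf.1), st.2)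
            else if xc.2 = '.' then (st.1, some (xc.1, yf.1))
            else st) st
        = (Option.or (pvH 'P' yf) st.1, Option.or (pvH '.' yf) st.2) := by
    intro st yf
    obtain ⟨a', b'⟩ := st
    rw [pvPairFold yf.1, pvInner_eq, pvInner_eq]
    simp [pvH]
  rw [show (fun (st : Option (Int × Int) × Option (Int × Int)) (yf : Int × String) =>
        (PySem.List.enumerate yf.2.toList).foldl
          (fun st xc =>
            if xc.2 = 'P' then (some (xc.1, yf.1), st.2)
            else if xc.2 = '.' then (st.1, some (xc.1, yf.1))
            else st) st)
      = (fun st yf => (Option.or (pvH 'P' yf) st.1, Option.or (pvH '.' yf) st.2)) from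
        funext fun st => funext fun yf => step st yf]
  induction rows generalizing a b with
  | nil => simp
  | cons r rs ih =>
    simp only [List.foldl_cons, List.reverse_cons]
    rw [ih, List.findSome?_append, List.findSome?_append]
    cases h1 : pvH 'P' r <;> cases h2 : pvH '.' r <;>
      cases hf1 : rs.reverse.findSome? (pvH 'P') <;> cases hf2 : rs.reverse.findSome? (pvH '.') <;>
        simp [List.findSome?, h1, h2, Option.or]

-- B's loop, characterised (the early break does not change the value)
theorem pvBLoop_eq : ∀ (l : List (Int × String)) (i f : Option (Int × Int)),
    pvBLoop l i f = (Option.or i (l.findSome? (pvH 'P')), Option.or f (l.findSome? (pvH '.'))) := by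
  intro l
  induction l with
  | nil => intro i f; simp [pvBLoop]
  | cons yf rest ih =>
    intro i f
    have hP := pvRowB_eq 'P' "P" (by decide) yf
    have hD := pvRowB_eq '.' "." (by decide) yf
    simp only [pvBLoop]
    have stepI : (match i with
        | some v => some v
        | none => let x := PySem.Str.rfind yf.2 "P"; if x ≠ -1 then some (x, yf.1) else none)
        = Option.or i (pvH 'P' yf) := by
      cases i with
      | some v => simp [Option.or]
      | none => simpa [Option.or] using hP
    have stepF : (match f with
        | some v => some v
        | none => let x := PySem.Str.rfind yf.2 "."; if x ≠ -1 then some (x, yf.1) else none)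
        = Option.or f (pvH '.' yf) := by
      cases f with
      | some v => simp [Option.or]
      | none => simpa [Option.or] using hD
    rw [stepI, stepF]
    by_cases hb : (Option.or i (pvH 'P' yf)).isSome && (Option.or f (pvH '.' yf)).isSome
    · rw [if_pos hb]
      simp only [Bool.and_eq_true, Option.isSome_iff_exists] at hb
      obtain ⟨⟨v1, hv1⟩, ⟨v2, hv2⟩⟩ := hb
      cases h1 : pvH 'P' yf <;> cases h2 : pvH '.' yf <;> cases i <;> cases f <;>
        simp_all [List.findSome?, Option.or]
    · rw [if_neg hb, ih]
      cases h1 : pvH 'P' yf <;> cases h2 : pvH '.' yf <;> cases i <;> cases f <;>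
        simp_all [List.findSome?, Option.or]

-- ===== VERDICT (by name: the statement is the Claim_ definition above) =====
theorem encontrar_inicio_y_fin_spec : Claim_equal_encontrar_inicio_y_fin := by
  intro mapa_str _ _
  unfold Spec_encontrar_inicio_y_fin encontrar_inicio_y_fin encontrar_inicio_y_fin_alt
  simp only [pvAScan, pvBLoop_eq, Option.or_none, Option.none_or]
  cases List.findSome? (pvH 'P')
      (PySem.List.enumerate ((PySem.Str.split? (PySem.Str.strip mapa_str) "\n").getD [])).reverse <;>
    cases List.findSome? (pvH '.')
        (PySem.List.enumerate ((PySem.Str.split? (PySem.Str.strip mapa_str) "\n").getD [])).reverse <;>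
      rfl
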